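-- pv_equiv track=rewrite | github.com/LightspeedDMS/code-indexer | src/code_indexer/global_repos/dependency_map_analyzer.py | _has_markdown_headings
-- ===== SOURCE A (Python) =====
-- def _has_markdown_headings(text: str) -> bool:
--     """
--     Check if text contains markdown headings (levels 1-3).
--
--     Used to detect if Claude output contains actual structured content
--     vs pure meta-commentary.
--
--     Args:
--         text: Text to check
--
--     Returns:
--         True if text contains at least one markdown heading (# , ## , ### )
--     """
--     if not text:
--         return False
--
--     for line in text.split("\n"):
--         stripped = line.strip()
--         if (
--             stripped.startswith("# ")
--             or stripped.startswith("## ")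
--             or stripped.startswith("### ")
--         ):
--             return True
--
--     return False
-- ===== SOURCE B (Python) =====
-- def _has_markdown_headings(text: str) -> bool:
--     """Single-pass character state machine; no split/strip/startswith.
--
--     state 0      : at line start, skipping leading whitespace
--     state 1..3   : that many '#' seen at the start of the line
--     state 4      : saw 1-3 '#' followed by a space; waiting for a
--                    non-whitespace character (so '#  ' alone is not a heading,
--                    matching str.strip()'s removal of trailing whitespace)
--     state 5      : line cannot be a heading
--     """
--     state = 0
--     for ch in text:
--         if ch == "\n":
--             state = 0
--         elif state == 5:
--             pass
--         elif state == 4: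
--             if not ch.isspace():
--                 return True
--         elif ch.isspace():
--             if ch == " " and 1 <= state <= 3:
--                 state = 4
--             elif state != 0:
--                 state = 5
--         elif ch == "#":
--             state = state + 1 if state < 3 else 5
--         else:
--             state = 5
--     return False
-- ===== Notes on version B (the rewrite author's own statement) =====
-- stated objective: alternative
-- what changed: A splits the text into lines and runs strip()/three startswith() passes over each line; B makes a single pass over the characters with a 6-state machine (line start / 1-3 hashes / seen '#'*k + space / dead) and never materialises lines or stripped strings.
import Mathlib
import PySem

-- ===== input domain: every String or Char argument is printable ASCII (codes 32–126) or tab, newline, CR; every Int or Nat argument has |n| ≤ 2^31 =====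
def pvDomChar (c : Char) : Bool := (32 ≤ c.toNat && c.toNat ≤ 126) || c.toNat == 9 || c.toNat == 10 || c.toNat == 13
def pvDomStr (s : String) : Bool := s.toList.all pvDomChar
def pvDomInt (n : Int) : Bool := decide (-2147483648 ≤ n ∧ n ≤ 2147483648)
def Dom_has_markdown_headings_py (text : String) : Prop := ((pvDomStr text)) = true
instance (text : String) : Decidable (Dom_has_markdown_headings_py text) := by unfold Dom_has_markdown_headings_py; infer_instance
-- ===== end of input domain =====

-- B replaces A's split/strip/startswith line loop by a single-pass character state machine; objective: alternative (same O(n) cost, different mechanism).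

-- ===== PORT A =====
-- loop body of A: stripped = line.strip(); stripped.startswith("# ") or ... ("## ") or ... ("### ")
def pvLineHit (line : List Char) : Bool :=
  let stripped := PySem.Chars.strip line
  PySem.Chars.startswith stripped ['#', ' '] ||
  PySem.Chars.startswith stripped ['#', '#', ' '] ||
  PySem.Chars.startswith stripped ['#', '#', '#', ' ']

def has_markdown_headings_py (text : String) : Bool :=
  if text = "" then false
  else (PySem.Chars.splitOn text.toList ['\n']).any pvLineHit

-- ===== PORT B =====
-- the state machine of Source B; states as in Source B's comment (0 line start, 1-3 hashes seen, 4 after "#"*k + " ", 5 dead)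
def pvRunB : Nat → List Char → Bool
  | _, [] => false
  | s, c :: cs =>
    if c = '\n' then pvRunB 0 cs
    else if s = 5 then pvRunB 5 cs
    else if s = 4 then (if !(PySem.Chars.isspace c) then true else pvRunB 4 cs)
    else if PySem.Chars.isspace c then
      (if c = ' ' ∧ 1 ≤ s ∧ s ≤ 3 then pvRunB 4 cs
       else if s ≠ 0 then pvRunB 5 cs else pvRunB 0 cs)
    else if c = '#' then (if s < 3 then pvRunB (s + 1) cs else pvRunB 5 cs)
    else pvRunB 5 cs

def has_markdown_headings_py_alt (text : String) : Bool := pvRunB 0 text.toList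

-- ===== PRECONDITION & SPEC =====
def Spec_has_markdown_headings_py (text : String) (out : Bool) : Prop := out = has_markdown_headings_py_alt text
instance (text : String) (out : Bool) : Decidable (Spec_has_markdown_headings_py text out) := by unfold Spec_has_markdown_headings_py; infer_instance

-- ===== CLAIM (what is proved, stated in full; the proofs are below) =====
def Claim_equal_has_markdown_headings_py : Prop := ∀ (text : String), Dom_has_markdown_headings_py text → Spec_has_markdown_headings_py text (has_markdown_headings_py text)

-- ===== LEMMAS AND PROOFS =====

-- proof-side model of str.split("\n"): pre is the part of the current line already read
def pvSplitNl : List Char → List Char → List (List Char)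
  | pre, [] => [pre]
  | pre, c :: rest => if c = '\n' then pre :: pvSplitNl [] rest else pvSplitNl (pre ++ [c]) rest

theorem pvGo_eq : ∀ (l : List Char) (fuel : Nat) (cur : List Char) (acc : List (List Char)),
    l.length < fuel →
    PySem.Chars.splitOn.go ['\n'] fuel l cur acc = acc.reverse ++ pvSplitNl cur.reverse l := by
  intro l
  induction l with
  | nil =>
    intro fuel cur acc h
    cases fuel with
    | zero => omega
    | succ f => simp [PySem.Chars.splitOn.go, pvSplitNl]
  | cons c rest ih =>
    intro fuel cur acc h
    cases fuel with
    | zero => omega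
    | succ f =>
      by_cases hc : c = '\n'
      · subst hc
        have hp : List.isPrefixOf ['\n'] ('\n' :: rest) = true := by simp [List.isPrefixOf]
        simp only [PySem.Chars.splitOn.go, hp, if_true, List.length_cons, List.length_nil,
                   List.drop_succ_cons, List.drop_zero, Nat.zero_add] at *
        rw [ih f [] (cur.reverse :: acc) (by omega)]
        simp [pvSplitNl]
      · have hp : List.isPrefixOf ['\n'] (c :: rest) = false := by
          simp [List.isPrefixOf]
          exact fun h' => (hc h'.symm).elim
        simp only [PySem.Chars.splitOn.go, hp, Bool.false_eq_true, if_false,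
                   List.length_cons] at *
        rw [ih f (c :: cur) acc (by omega)]
        simp [pvSplitNl, hc]

theorem pvSplitOn_eq (cs : List Char) :
    PySem.Chars.splitOn cs ['\n'] = pvSplitNl [] cs := by
  have := pvGo_eq cs (cs.length + 1) [] [] (by omega)
  simpa [PySem.Chars.splitOn] using this

theorem pvSplitNl_no_nl : ∀ (l pre : List Char), '\n' ∉ l → pvSplitNl pre l = [pre ++ l] := by
  intro l
  induction l with
  | nil => simp [pvSplitNl]
  | cons c rest ih =>
    intro pre h
    simp only [List.mem_cons, not_or] at h
    simp [pvSplitNl, Ne.symm h.1, ih (pre ++ [c]) h.2]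

theorem pvSplitNl_append : ∀ (l pre r : List Char), '\n' ∉ l →
    pvSplitNl pre (l ++ '\n' :: r) = (pre ++ l) :: pvSplitNl [] r := by
  intro l
  induction l with
  | nil => simp [pvSplitNl]
  | cons c rest ih =>
    intro pre r h
    simp only [List.mem_cons, not_or] at h
    simp [pvSplitNl, Ne.symm h.1, ih (pre ++ [c]) r h.2]

theorem pvRstrip_cons_nonws {c : Char} (l : List Char) (h : PySem.Chars.isspace c = false) :
    PySem.Chars.rstrip (c :: l) = c :: PySem.Chars.rstrip l := by
  simp only [PySem.Chars.rstrip, List.reverse_cons, List.dropWhile_append]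
  by_cases he : (List.dropWhile PySem.Chars.isspace l.reverse).isEmpty = true
  · rw [if_pos he]
    simp_all [List.isEmpty_iff, List.dropWhile, h]
  · rw [if_neg he]
    simp [List.reverse_append]

theorem pvRstrip_cons_ws {c : Char} (l : List Char) (h : PySem.Chars.isspace c = true) :
    PySem.Chars.rstrip (c :: l) =
      if PySem.Chars.rstrip l = [] then [] else c :: PySem.Chars.rstrip l := by
  simp only [PySem.Chars.rstrip, List.reverse_cons, List.dropWhile_append]
  by_cases he : (List.dropWhile PySem.Chars.isspace l.reverse).isEmpty = true
  · rw [if_pos he]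
    simp_all [List.isEmpty_iff, List.dropWhile, h]
  · rw [if_neg he]
    rw [if_neg (by simp_all [List.isEmpty_iff])]
    simp [List.reverse_append]

theorem pvC5 : ∀ (l : List Char), '\n' ∉ l → pvRunB 5 l = false := by
  intro l
  induction l with
  | nil => simp [pvRunB]
  | cons c rest ih =>
    intro h
    simp only [List.mem_cons, not_or] at h
    simp [pvRunB, Ne.symm h.1, ih h.2]

theorem pvC4 : ∀ (l : List Char), '\n' ∉ l →
    pvRunB 4 l = !(PySem.Chars.rstrip l).isEmpty := by
  intro l
  induction l with
  | nil => simp [pvRunB, PySem.Chars.rstrip]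
  | cons c rest ih =>
    intro h
    simp only [List.mem_cons, not_or] at h
    by_cases hs : PySem.Chars.isspace c = true
    · rw [show pvRunB 4 (c :: rest) = pvRunB 4 rest by simp [pvRunB, Ne.symm h.1, hs],
          pvRstrip_cons_ws rest hs, ih h.2]
      by_cases hre : PySem.Chars.rstrip rest = [] <;> simp [hre]
    · simp only [Bool.not_eq_true] at hs
      rw [pvRstrip_cons_nonws rest hs]
      simp [pvRunB, Ne.symm h.1, hs]

theorem pvC3 (l : List Char) (h : '\n' ∉ l) :
    pvRunB 3 l = PySem.Chars.startswith (PySem.Chars.rstrip l) [' '] := by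
  cases l with
  | nil => simp [pvRunB, PySem.Chars.rstrip, PySem.Chars.startswith, List.isPrefixOf]
  | cons c rest =>
    simp only [List.mem_cons, not_or] at h
    by_cases hs : PySem.Chars.isspace c = true
    · rw [pvRstrip_cons_ws rest hs]
      by_cases hsp : c = ' '
      · subst hsp
        rw [show pvRunB 3 (' ' :: rest) = pvRunB 4 rest by simp [pvRunB, hs], pvC4 rest h.2]
        split <;> simp_all [PySem.Chars.startswith, List.isPrefixOf]
      · rw [show pvRunB 3 (c :: rest) = pvRunB 5 rest by
              simp [pvRunB, Ne.symm h.1, hs, hsp], pvC5 rest h.2]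
        split <;> simp_all [PySem.Chars.startswith, List.isPrefixOf, Ne.symm hsp]
    · simp only [Bool.not_eq_true] at hs
      rw [pvRstrip_cons_nonws rest hs]
      have hsp : c ≠ ' ' := by rintro rfl; simp [PySem.Chars.isspace] at hs
      rw [show pvRunB 3 (c :: rest) = pvRunB 5 rest by
            simp [pvRunB, Ne.symm h.1, hs], pvC5 rest h.2]
      simp [PySem.Chars.startswith, List.isPrefixOf, Ne.symm hsp]

theorem pvC2 (l : List Char) (h : '\n' ∉ l) :
    pvRunB 2 l = (PySem.Chars.startswith (PySem.Chars.rstrip l) [' '] ||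
                  PySem.Chars.startswith (PySem.Chars.rstrip l) ['#', ' ']) := by
  cases l with
  | nil => simp [pvRunB, PySem.Chars.rstrip, PySem.Chars.startswith, List.isPrefixOf]
  | cons c rest =>
    simp only [List.mem_cons, not_or] at h
    by_cases hs : PySem.Chars.isspace c = true
    · rw [pvRstrip_cons_ws rest hs]
      by_cases hsp : c = ' '
      · subst hsp
        rw [show pvRunB 2 (' ' :: rest) = pvRunB 4 rest by simp [pvRunB, hs], pvC4 rest h.2]
        split <;> simp_all [PySem.Chars.startswith, List.isPrefixOf]
      · have hhash : ¬'#' = c := by rintro rfl; simp [PySem.Chars.isspace] at hs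
        rw [show pvRunB 2 (c :: rest) = pvRunB 5 rest by
              simp [pvRunB, Ne.symm h.1, hs, hsp], pvC5 rest h.2]
        split <;> simp_all [PySem.Chars.startswith, List.isPrefixOf, Ne.symm hsp]
    · simp only [Bool.not_eq_true] at hs
      rw [pvRstrip_cons_nonws rest hs]
      have hsp : c ≠ ' ' := by rintro rfl; simp [PySem.Chars.isspace] at hs
      by_cases hh : c = '#'
      · subst hh
        rw [show pvRunB 2 ('#' :: rest) = pvRunB 3 rest by simp [pvRunB, hs], pvC3 rest h.2]
        simp [PySem.Chars.startswith, List.isPrefixOf]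
      · rw [show pvRunB 2 (c :: rest) = pvRunB 5 rest by
              simp [pvRunB, Ne.symm h.1, hs, hh], pvC5 rest h.2]
        simp [PySem.Chars.startswith, List.isPrefixOf, Ne.symm hsp, Ne.symm hh]

theorem pvC1 (l : List Char) (h : '\n' ∉ l) :
    pvRunB 1 l = (PySem.Chars.startswith (PySem.Chars.rstrip l) [' '] ||
                  PySem.Chars.startswith (PySem.Chars.rstrip l) ['#', ' '] ||
                  PySem.Chars.startswith (PySem.Chars.rstrip l) ['#', '#', ' ']) := by
  cases l with
  | nil => simp [pvRunB, PySem.Chars.rstrip, PySem.Chars.startswith, List.isPrefixOf]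
  | cons c rest =>
    simp only [List.mem_cons, not_or] at h
    by_cases hs : PySem.Chars.isspace c = true
    · rw [pvRstrip_cons_ws rest hs]
      by_cases hsp : c = ' '
      · subst hsp
        rw [show pvRunB 1 (' ' :: rest) = pvRunB 4 rest by simp [pvRunB, hs], pvC4 rest h.2]
        split <;> simp_all [PySem.Chars.startswith, List.isPrefixOf]
      · have hhash : ¬'#' = c := by rintro rfl; simp [PySem.Chars.isspace] at hs
        rw [show pvRunB 1 (c :: rest) = pvRunB 5 rest by
              simp [pvRunB, Ne.symm h.1, hs, hsp], pvC5 rest h.2]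
        split <;> simp_all [PySem.Chars.startswith, List.isPrefixOf, Ne.symm hsp]
    · simp only [Bool.not_eq_true] at hs
      rw [pvRstrip_cons_nonws rest hs]
      have hsp : c ≠ ' ' := by rintro rfl; simp [PySem.Chars.isspace] at hs
      by_cases hh : c = '#'
      · subst hh
        rw [show pvRunB 1 ('#' :: rest) = pvRunB 2 rest by simp [pvRunB, hs], pvC2 rest h.2]
        simp [PySem.Chars.startswith, List.isPrefixOf]
      · rw [show pvRunB 1 (c :: rest) = pvRunB 5 rest by
              simp [pvRunB, Ne.symm h.1, hs, hh], pvC5 rest h.2]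
        simp [PySem.Chars.startswith, List.isPrefixOf, Ne.symm hsp, Ne.symm hh]

theorem pvC0 : ∀ (l : List Char), '\n' ∉ l → pvRunB 0 l = pvLineHit l := by
  intro l
  induction l with
  | nil =>
    simp [pvRunB, pvLineHit, PySem.Chars.strip, PySem.Chars.lstrip, PySem.Chars.rstrip,
          PySem.Chars.startswith, List.isPrefixOf]
  | cons c rest ih =>
    intro h
    simp only [List.mem_cons, not_or] at h
    by_cases hs : PySem.Chars.isspace c = true
    · have hstrip : PySem.Chars.strip (c :: rest) = PySem.Chars.strip rest := by
        simp [PySem.Chars.strip, PySem.Chars.lstrip, List.dropWhile_cons, hs]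
      rw [show pvRunB 0 (c :: rest) = pvRunB 0 rest by simp [pvRunB, Ne.symm h.1, hs],
          ih h.2]
      simp [pvLineHit, hstrip]
    · simp only [Bool.not_eq_true] at hs
      have hstrip : PySem.Chars.strip (c :: rest) = c :: PySem.Chars.rstrip rest := by
        rw [PySem.Chars.strip,
            show PySem.Chars.lstrip (c :: rest) = c :: rest by
              simp [PySem.Chars.lstrip, List.dropWhile_cons, hs],
            pvRstrip_cons_nonws rest hs]
      have hsp : c ≠ ' ' := by rintro rfl; simp [PySem.Chars.isspace] at hs
      by_cases hh : c = '#'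
      · subst hh
        rw [show pvRunB 0 ('#' :: rest) = pvRunB 1 rest by simp [pvRunB, hs], pvC1 rest h.2]
        simp [pvLineHit, hstrip, PySem.Chars.startswith, List.isPrefixOf]
      · rw [show pvRunB 0 (c :: rest) = pvRunB 5 rest by simp [pvRunB, Ne.symm h.1, hs, hh],
            pvC5 rest h.2]
        simp [pvLineHit, hstrip, PySem.Chars.startswith, List.isPrefixOf, Ne.symm hh]

theorem pvLine_split : ∀ (l : List Char) (s : Nat) (r : List Char), '\n' ∉ l →
    pvRunB s (l ++ '\n' :: r) = (pvRunB s l || pvRunB 0 r) := by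
  intro l
  induction l with
  | nil => intro s r _; simp [pvRunB]
  | cons c rest ih =>
    intro s r h
    simp only [List.mem_cons, not_or] at h
    simp only [List.cons_append, pvRunB, Ne.symm h.1, if_false]
    split_ifs <;> simp [ih _ _ h.2]

theorem pvMain : ∀ (cs : List Char), pvRunB 0 cs = (pvSplitNl [] cs).any pvLineHit := by
  intro cs
  induction hn : cs.length using Nat.strong_induction_on generalizing cs with
  | _ n ih =>
  by_cases h : '\n' ∈ cs
  · set t := cs.takeWhile (fun c => !(c == '\n')) with ht
    set d := cs.dropWhile (fun c => !(c == '\n')) with hd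
    have hsplit : t ++ d = cs := List.takeWhile_append_dropWhile
    have hdne : d ≠ [] := by
      rw [hd]
      intro hnil
      rw [List.dropWhile_eq_nil_iff] at hnil
      simpa using hnil '\n' h
    have hlnn : '\n' ∉ t := by
      intro hmem
      rw [ht] at hmem
      simpa using List.mem_takeWhile_imp hmem
    obtain ⟨c, r, hdr⟩ := List.exists_cons_of_ne_nil hdne
    have h3 : cs.dropWhile (fun c => !(c == '\n')) = c :: r := by rw [← hd, hdr]
    have hc : c = '\n' := by
      have h2 := List.head_dropWhile_not (p := fun c => !(c == '\n')) (l := cs)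
        (by rw [← hd]; exact hdne)
      simpa [h3] using h2
    subst hc
    have hcs : cs = t ++ '\n' :: r := by rw [← hsplit, hdr]
    have hlen : r.length < n := by
      subst hn
      conv_rhs => rw [hcs]
      simp [List.length_append]
      omega
    rw [hcs, pvLine_split t 0 r hlnn, pvSplitNl_append t [] r hlnn, pvC0 t hlnn]
    simp [ih r.length hlen r rfl]
  · rw [pvSplitNl_no_nl cs [] h, pvC0 cs h]
    simp

-- ===== VERDICT (by name: the statement is the Claim_ definition above) =====
theorem has_markdown_headings_py_spec : Claim_equal_has_markdown_headings_py := by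
  intro text _
  unfold Spec_has_markdown_headings_py has_markdown_headings_py has_markdown_headings_py_alt
  by_cases ht : text = ""
  · subst ht; simp [pvRunB]
  · rw [if_neg ht, pvSplitOn_eq, ← pvMain]
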